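-- pv_equiv track=rewrite | github.com/dirtysalt/codes | geeksforgeeks/top-k-numbers.py | solve
-- ===== SOURCE A (Python) =====
-- from collections import Counter
--
-- def solve(n, k, numbers):
--     counter = Counter()
--     res = []
--     output = []
--     for x in numbers:
--         cnt = counter[x] + 1
--         counter[x] += 1
--
--         ok = False
--         for i in range(len(res)):
--             if res[i][0] == x:
--                 res[i] = (x, cnt)
--                 ok = True
--                 pos = i
--                 break
--
--         if not ok:
--             res.append((x, cnt))
--             pos = len(res) - 1
--
--         for i in range(pos, 0, -1):
--             if res[i][1] > res[i - 1][1] or (res[i][1] == res[i - 1][1] and res[i][0] < res[i - 1][0]):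
--                 res[i], res[i - 1] = res[i - 1], res[i]
--             else:
--                 break
--
--         if len(res) > k:
--             res.pop()
--
--         for x in res:
--             output.append(x[0])
--     # return output
--     return ' '.join([str(x) for x in output])
-- ===== SOURCE B (Python) =====
-- from collections import Counter
--
-- def solve(n, k, numbers):
--     counter = Counter()
--     output = []
--     for x in numbers:
--         counter[x] += 1
--         items = sorted(counter.items(), key=lambda p: (-p[1], p[0]))
--         output.extend(v for v, _ in items[:max(k, 0)])
--     return ' '.join(str(v) for v in output)
-- ===== Notes on version B (the rewrite author's own statement) =====
-- stated objective: simpler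
-- what changed: Replaces the incremental sorted top-k list maintenance (linear scan for the entry, adjacent-swap bubble-up, conditional pop) with a from-scratch re-sort of the whole Counter by (-count, value) at every step, emitting the first max(k,0) items.
import Mathlib
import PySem

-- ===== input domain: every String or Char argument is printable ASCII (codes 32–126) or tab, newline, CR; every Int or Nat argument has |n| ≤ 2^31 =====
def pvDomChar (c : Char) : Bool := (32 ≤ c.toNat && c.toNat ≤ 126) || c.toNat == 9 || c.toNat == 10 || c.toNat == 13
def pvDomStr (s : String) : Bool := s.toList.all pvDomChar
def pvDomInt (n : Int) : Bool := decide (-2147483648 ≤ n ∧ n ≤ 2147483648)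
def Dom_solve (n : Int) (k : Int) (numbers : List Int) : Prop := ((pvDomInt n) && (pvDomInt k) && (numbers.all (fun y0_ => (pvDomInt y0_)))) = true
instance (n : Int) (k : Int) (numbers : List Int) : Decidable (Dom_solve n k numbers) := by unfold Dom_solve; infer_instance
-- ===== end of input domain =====

-- B replaces A's incremental sorted top-k maintenance with a full re-sort of the counter by
-- (-count, value) at every step (objective: simpler); both return the same string everywhere.

-- ===== PORT A =====
-- A's swap test: res[i][1] > res[i-1][1] or (res[i][1] == res[i-1][1] and res[i][0] < res[i-1][0])
def aLt (p q : Int × Int) : Bool := decide (q.2 < p.2) || (p.2 == q.2 && decide (p.1 < q.1))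

-- the scan 'for i in range(len(res)): if res[i][0] == x: …; break' — returns the part of res
-- strictly before the first entry with key x and the part strictly after it (none = not found)
def aScan (res : List (Int × Int)) (x : Int) : Option (List (Int × Int) × List (Int × Int)) :=
  match res with
  | [] => none
  | p :: t => if p.1 = x then some ([], t)
              else (aScan t x).map (fun pr => (p :: pr.1, pr.2))

-- the bubble-up loop 'for i in range(pos, 0, -1): swap or break': the element e at position pos
-- walks left past each predecessor l with aLt e l, stopping at the first one without; expressed
-- as recursion over the REVERSED prefix left of pos
def aBubbleR (revPre : List (Int × Int)) (e : Int × Int) : List (Int × Int) :=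
  match revPre with
  | [] => [e]
  | l :: ls => if aLt e l then l :: aBubbleR ls e else e :: l :: ls

def aBubble (pre : List (Int × Int)) (e : Int × Int) : List (Int × Int) :=
  (aBubbleR pre.reverse e).reverse

-- one iteration of A's main loop over the state (counter, res, output)
def aStep (k : Int) (st : PySem.Dict Int Int × List (Int × Int) × List Int) (x : Int) :
    PySem.Dict Int Int × List (Int × Int) × List Int :=
  let counter := st.1
  let res := st.2.1
  let output := st.2.2
  let cnt := counter.getD x 0 + 1
  let counter := counter.insert x cnt
  let res := match aScan res x with
    | some pr => aBubble pr.1 (x, cnt) ++ pr.2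
    | none => aBubble res (x, cnt)
  let res := if (res.length : Int) > k then res.dropLast else res
  (counter, res, output ++ res.map (·.1))

def solve (n : Int) (k : Int) (numbers : List Int) : String :=
  let st := numbers.foldl (aStep k) (PySem.Dict.empty, [], [])
  PySem.Str.join " " (st.2.2.map PySem.Int.toStr)

-- ===== PORT B =====
-- one iteration of B's loop: bump the counter, re-sort all items by (-count, value),
-- emit the first max(k, 0) values
def bStep (k : Int) (st : PySem.Dict Int Int × List Int) (x : Int) :
    PySem.Dict Int Int × List Int :=
  let counter := st.1.modify x 0 (· + 1)
  let items := PySem.List.sorted2 counter.items (fun p => -p.2) (fun p => p.1)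
  (counter, st.2 ++ (PySem.List.slice items none (some (max k 0))).map (·.1))

def solve_alt (n : Int) (k : Int) (numbers : List Int) : String :=
  let st := numbers.foldl (bStep k) (PySem.Dict.empty, [])
  PySem.Str.join " " (st.2.map PySem.Int.toStr)

-- ===== PRECONDITION & SPEC =====
def Spec_solve (n : Int) (k : Int) (numbers : List Int) (out : String) : Prop := out = solve_alt n k numbers
instance (n : Int) (k : Int) (numbers : List Int) (out : String) : Decidable (Spec_solve n k numbers out) := by unfold Spec_solve; infer_instance

-- ===== CLAIM (what is proved, stated in full; the proofs are below) =====
def Claim_equal_solve : Prop := ∀ (n : Int) (k : Int) (numbers : List Int), Dom_solve n k numbers → Spec_solve n k numbers (solve n k numbers)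

-- ===== LEMMAS AND PROOFS =====

def Plt (p q : Int × Int) : Prop := q.2 < p.2 ∨ (p.2 = q.2 ∧ p.1 < q.1)

theorem aLt_iff (p q : Int × Int) : aLt p q = true ↔ Plt p q := by simp [aLt, Plt]

theorem Plt_trans {p q r : Int × Int} (h1 : Plt p q) (h2 : Plt q r) : Plt p r := by
  rcases h1 with h1 | ⟨h1, h1'⟩ <;> rcases h2 with h2 | ⟨h2, h2'⟩ <;> simp only [Plt] <;> omega

theorem Plt_asymm {p q : Int × Int} (h1 : Plt p q) (h2 : Plt q p) : False := by
  rcases h1 with h1 | ⟨h1, h1'⟩ <;> rcases h2 with h2 | ⟨h2, h2'⟩ <;> omega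

theorem Plt_total {p q : Int × Int} (h : p.1 ≠ q.1) : Plt p q ∨ Plt q p := by
  simp only [Plt]; omega

theorem ins_nil (e : Int × Int) : PySem.List.insertBy aLt e [] = [e] := rfl

theorem ins_cons (e y : Int × Int) (l : List (Int × Int)) :
    PySem.List.insertBy aLt e (y :: l) =
      if aLt e y then e :: y :: l else y :: PySem.List.insertBy aLt e l := rfl

theorem ins_perm (e : Int × Int) (l : List (Int × Int)) :
    (PySem.List.insertBy aLt e l).Perm (e :: l) := by
  induction l with
  | nil => rfl
  | cons y l' ih =>
    rw [ins_cons]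
    by_cases h : aLt e y
    · simp [h]
    · simp only [h, if_false]
      exact (ih.cons y).trans (List.Perm.swap e y l')

def sortS (xs : List (Int × Int)) : List (Int × Int) :=
  xs.foldl (fun acc x => PySem.List.insertBy aLt x acc) []

theorem sortS_acc_perm (xs acc : List (Int × Int)) :
    (xs.foldl (fun acc x => PySem.List.insertBy aLt x acc) acc).Perm (acc ++ xs) := by
  induction xs generalizing acc with
  | nil => simp
  | cons x xs ih =>
    simp only [List.foldl_cons]
    exact (ih _).trans (((ins_perm x acc).append_right xs).trans List.perm_middle.symm)

theorem sortS_perm (xs : List (Int × Int)) : (sortS xs).Perm xs := sortS_acc_perm xs []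

theorem ins_pairwise (e : Int × Int) (l : List (Int × Int))
    (hpw : l.Pairwise Plt) (hcmp : ∀ y ∈ l, Plt e y ∨ Plt y e) :
    (PySem.List.insertBy aLt e l).Pairwise Plt := by
  induction l with
  | nil => simp [ins_nil, Plt]
  | cons y l' ih =>
    rw [ins_cons]
    rcases List.pairwise_cons.mp hpw with ⟨hy, hl'⟩
    by_cases h : aLt e y
    · simp only [h, if_true]
      refine List.pairwise_cons.mpr ⟨?_, hpw⟩
      intro z hz
      rcases List.mem_cons.mp hz with hz | hz
      · subst hz; exact (aLt_iff _ _).mp h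
      · exact Plt_trans ((aLt_iff _ _).mp h) (hy z hz)
    · simp only [h, if_false]
      refine List.pairwise_cons.mpr ⟨?_, ih hl' (fun z hz => hcmp z (by simp [hz]))⟩
      intro z hz
      rcases (PySem.List.mem_insertBy aLt e z l').mp hz with hz | hz
      · subst hz
        rcases hcmp y (by simp) with he | he
        · exact absurd ((aLt_iff _ _).mpr he) h
        · exact he
      · exact hy z hz

theorem sortS_pairwise_acc (xs acc : List (Int × Int))
    (hacc : acc.Pairwise Plt)
    (hx : ∀ x ∈ xs, ∀ y ∈ acc, x.1 ≠ y.1)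
    (hxs : xs.Pairwise (fun a b => a.1 ≠ b.1)) :
    (xs.foldl (fun acc x => PySem.List.insertBy aLt x acc) acc).Pairwise Plt := by
  induction xs generalizing acc with
  | nil => simpa
  | cons x xs ih =>
    simp only [List.foldl_cons]
    rcases List.pairwise_cons.mp hxs with ⟨hx1, hxs'⟩
    refine ih _ (ins_pairwise x acc hacc (fun y hy => Plt_total (hx x (by simp) y hy))) ?_ hxs'
    intro z hz y hy
    rcases (PySem.List.mem_insertBy aLt x y acc).mp hy with hy | hy
    · subst hy; exact fun hne => (hx1 z hz) hne.symm
    · exact hx z (by simp [hz]) y hy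

theorem sortS_pairwise (xs : List (Int × Int))
    (hk : xs.Pairwise (fun a b => a.1 ≠ b.1)) : (sortS xs).Pairwise Plt :=
  sortS_pairwise_acc xs [] (by simp) (by simp) hk

theorem sorted_unique {l₁ l₂ : List (Int × Int)} (hp : l₁.Perm l₂)
    (h1 : l₁.Pairwise Plt) (h2 : l₂.Pairwise Plt) : l₁ = l₂ :=
  List.Perm.eq_of_pairwise (fun _ _ _ _ ha hb => (Plt_asymm ha hb).elim) h1 h2 hp

theorem sorted2_eq_sortS (xs : List (Int × Int)) :
    PySem.List.sorted2 xs (fun p => -p.2) (fun p => p.1) = sortS xs := by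
  have hfun : (fun (a b : Int × Int) =>
      decide ((-a.2 : Int) < -b.2) || (!decide ((-b.2 : Int) < -a.2) && decide (a.1 < b.1))) = aLt := by
    funext a b
    by_cases h1 : b.2 < a.2 <;> by_cases h2 : a.2 < b.2 <;> by_cases h3 : a.1 < b.1 <;>
      simp [aLt, h1, h2, h3] <;> omega
  have h0 : PySem.List.sorted2 xs (fun p => -p.2) (fun p => p.1) =
      xs.foldl (fun acc x => PySem.List.insertBy (fun a b =>
        decide ((-a.2 : Int) < -b.2) || (!decide ((-b.2 : Int) < -a.2) && decide (a.1 < b.1))) x acc) [] := rfl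
  rw [h0, hfun]; rfl

theorem ins_append_all (e : Int × Int) (l t : List (Int × Int))
    (ht : ∀ z ∈ t, aLt e z = true) :
    PySem.List.insertBy aLt e (l ++ t) = PySem.List.insertBy aLt e l ++ t := by
  induction l with
  | nil =>
    cases t with
    | nil => rfl
    | cons z t' => simp [ins_nil, ins_cons, ht z (by simp)]
  | cons y l' ih =>
    simp only [List.cons_append, ins_cons]
    by_cases h : aLt e y
    · simp [h]
    · simp [h, ih]

theorem bubble_eq_ins (pre : List (Int × Int)) (e : Int × Int)
    (hpw : pre.Pairwise Plt) (hcmp : ∀ y ∈ pre, Plt e y ∨ Plt y e) :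
    aBubble pre e = PySem.List.insertBy aLt e pre := by
  induction pre using List.reverseRecOn with
  | nil => rfl
  | append_singleton l₀ l ih =>
    rw [List.pairwise_append] at hpw
    obtain ⟨hl₀, -, hcross⟩ := hpw
    unfold aBubble
    rw [List.reverse_append, List.reverse_singleton, List.singleton_append]
    show (if aLt e l then l :: aBubbleR l₀.reverse e else e :: l :: l₀.reverse).reverse = _
    by_cases h : aLt e l
    · rw [if_pos h, List.reverse_cons]
      have := ih hl₀ (fun y hy => hcmp y (by simp [hy]))
      unfold aBubble at this
      rw [this, ins_append_all e l₀ [l] (by simpa using h)]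
    · rw [if_neg h]
      have hall : ∀ y ∈ l₀ ++ [l], aLt e y = false := by
        intro y hy
        rcases List.mem_append.mp hy with hy | hy
        · by_contra hc
          have : Plt e y := (aLt_iff _ _).mp (by simpa using hc)
          exact h ((aLt_iff _ _).mpr (Plt_trans this (hcross y hy l (by simp))))
        · simp at hy; subst hy
          exact Bool.not_eq_true _ ▸ (by simpa using h)
      rw [PySem.List.insertBy_of_forall_not_before aLt e _ hall]
      simp

theorem aScan_eq_some {res : List (Int × Int)} {x : Int}
    {pr : List (Int × Int) × List (Int × Int)} (h : aScan res x = some pr) :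
    ∃ o, res = pr.1 ++ (x, o) :: pr.2 ∧ ∀ p ∈ pr.1, p.1 ≠ x := by
  induction res generalizing pr with
  | nil => simp [aScan] at h
  | cons p t ih =>
    rw [aScan] at h
    by_cases hp : p.1 = x
    · rw [if_pos hp] at h
      obtain ⟨rfl⟩ := Option.some.inj h
      exact ⟨p.2, by simp [← hp], by simp⟩
    · rw [if_neg hp] at h
      rcases Option.map_eq_some_iff.mp h with ⟨pr', hpr', rfl⟩
      obtain ⟨o, heq, hpre⟩ := ih hpr'
      refine ⟨o, by simp [heq], ?_⟩
      intro q hq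
      rcases List.mem_cons.mp hq with hq | hq
      · subst hq; exact hp
      · exact hpre q hq

theorem aScan_eq_none {res : List (Int × Int)} {x : Int} (h : aScan res x = none) :
    ∀ p ∈ res, p.1 ≠ x := by
  induction res with
  | nil => simp
  | cons p t ih =>
    rw [aScan] at h
    by_cases hp : p.1 = x
    · simp [hp] at h
    · rw [if_neg hp] at h
      intro q hq
      rcases List.mem_cons.mp hq with hq | hq
      · subst hq; exact hp
      · exact ih (Option.map_eq_none_iff.mp h) q hq

def KOK (c : PySem.Dict Int Int) : Prop := c.items.Pairwise (fun a b => a.1 ≠ b.1)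

theorem KOK_empty : KOK (PySem.Dict.empty : PySem.Dict Int Int) := List.Pairwise.nil

theorem contains_iff (c : PySem.Dict Int Int) (x : Int) :
    c.contains x = true ↔ ∃ p ∈ c.items, p.1 = x := by
  simp [PySem.Dict.contains, List.any_eq_true]

theorem KOK_insert (c : PySem.Dict Int Int) (x v : Int) (h : KOK c) :
    KOK (c.insert x v) := by
  unfold KOK PySem.Dict.insert
  by_cases hc : c.contains x = true
  · rw [if_pos hc]
    refine List.pairwise_map.mpr (List.Pairwise.imp ?_ h)
    intro a b hab
    by_cases ha : a.1 == x <;> by_cases hb : b.1 == x <;>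
      simp_all
  · rw [if_neg hc]
    refine List.pairwise_append.mpr ⟨h, by simp, ?_⟩
    intro a ha b hb
    simp only [List.mem_singleton] at hb
    subst hb
    intro hax
    exact hc ((contains_iff c x).mpr ⟨a, ha, hax⟩)

theorem find?_key {x o : Int} (l : List (Int × Int))
    (h : l.Pairwise (fun a b => a.1 ≠ b.1)) (hm : (x, o) ∈ l) :
    l.find? (fun p => p.1 == x) = some (x, o) := by
  induction l with
  | nil => simp at hm
  | cons p t ih =>
    rcases List.pairwise_cons.mp h with ⟨hp, ht⟩
    rcases List.mem_cons.mp hm with hm' | hm'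
    · subst hm'; simp [List.find?_cons]
    · have hne : (p.1 == x) = false := by
        simp only [beq_eq_false_iff_ne, ne_eq]
        exact hp _ hm'
      rw [List.find?_cons_of_neg (by simp [hne]), ih ht hm']

theorem getD_of_mem {c : PySem.Dict Int Int} {x o : Int} (h : KOK c)
    (hm : (x, o) ∈ c.items) : c.getD x 0 = o := by
  unfold PySem.Dict.getD PySem.Dict.get?
  rw [find?_key c.items h hm]
  rfl

theorem map_replace_perm (x v : Int) (t : List (Int × Int))
    (h : t.Pairwise (fun a b => a.1 ≠ b.1)) (hex : ∃ p ∈ t, p.1 = x) :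
    (t.map (fun q => if q.1 == x then (x, v) else q)).Perm
      ((x, v) :: t.filter (fun p => p.1 != x)) := by
  induction t with
  | nil => simp at hex
  | cons p t ih =>
    rcases List.pairwise_cons.mp h with ⟨hp, ht⟩
    rw [List.map_cons, List.filter_cons]
    by_cases hpx : p.1 = x
    · have hkeys : ∀ q ∈ t, (q.1 == x) = false := fun q hq => by
        simp only [beq_eq_false_iff_ne, ne_eq]
        exact fun he => (hp q hq) (hpx.trans he.symm)
      have hmap : t.map (fun q => if q.1 == x then (x, v) else q) = t := by
        rw [List.map_congr_left (g := id) (fun q hq => by rw [hkeys q hq]; rfl), List.map_id]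
      have hfil : t.filter (fun p => p.1 != x) = t := by
        rw [List.filter_eq_self]
        intro q hq
        simp [bne, hkeys q hq]
      rw [if_pos (by simp [hpx]), hmap, if_neg (by simp [hpx]), hfil]
    · rcases hex with ⟨q, hq, hqx⟩
      rcases List.mem_cons.mp hq with rfl | hq'
      · exact absurd hqx hpx
      · rw [if_neg (by simp [hpx]), if_pos (by simp [hpx])]
        exact ((ih ht ⟨q, hq', hqx⟩).cons p).trans (List.Perm.swap (x, v) p _)

theorem insert_items_perm (c : PySem.Dict Int Int) (x v : Int) (h : KOK c) :
    (c.insert x v).items.Perm ((x, v) :: c.items.filter (fun p => p.1 != x)) := by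
  unfold PySem.Dict.insert
  by_cases hc : c.contains x = true
  · rw [if_pos hc]
    exact map_replace_perm x v c.items h ((contains_iff c x).mp hc)
  · rw [if_neg hc]
    have hfil : c.items.filter (fun p => p.1 != x) = c.items := by
      rw [List.filter_eq_self]
      intro p hp
      simp only [bne_iff_ne, ne_eq, decide_eq_true_eq]
      exact fun he => hc ((contains_iff c x).mpr ⟨p, hp, he⟩)
    rw [hfil]
    exact List.perm_append_singleton _ _

theorem ins_length (e : Int × Int) (l : List (Int × Int)) :
    (PySem.List.insertBy aLt e l).length = l.length + 1 := by
  simpa using (ins_perm e l).length_eq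

theorem ins_append_left (e : Int × Int) (l t : List (Int × Int))
    (hl : ∃ y ∈ l, aLt e y = true) :
    PySem.List.insertBy aLt e (l ++ t) = PySem.List.insertBy aLt e l ++ t := by
  induction l with
  | nil => simp at hl
  | cons y l' ih =>
    simp only [List.cons_append, ins_cons]
    by_cases h : aLt e y
    · simp [h]
    · obtain ⟨z, hz, hz2⟩ := hl
      rcases List.mem_cons.mp hz with hz | hz
      · subst hz; simp [hz2] at h
      · simp [h, ih ⟨z, hz, hz2⟩]

theorem ins_append_right (e : Int × Int) (l t : List (Int × Int))
    (hl : ∀ y ∈ l, aLt e y = false) :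
    PySem.List.insertBy aLt e (l ++ t) = l ++ PySem.List.insertBy aLt e t := by
  induction l with
  | nil => rfl
  | cons y l' ih =>
    simp only [List.cons_append, ins_cons, hl y (by simp)]
    simp [ih (fun y hy => hl y (by simp [hy]))]

theorem step_res (k x : Int) (c : PySem.Dict Int Int) (res : List (Int × Int))
    (hkok : KOK c) (hres : res = (sortS c.items).take (max k 0).toNat) :
    (let cnt := c.getD x 0 + 1
     let mid := match aScan res x with
       | some pr => aBubble pr.1 (x, cnt) ++ pr.2
       | none => aBubble res (x, cnt)
     if (mid.length : Int) > k then mid.dropLast else mid) =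
    (sortS (c.insert x (c.getD x 0 + 1)).items).take (max k 0).toNat := by
  set m : Nat := (max k 0).toNat with hm
  have hmInt : (m : Int) = max k 0 := Int.toNat_of_nonneg (le_max_right k 0)
  set cnt : Int := c.getD x 0 + 1 with hcnt
  set e : Int × Int := (x, cnt) with he
  set s : List (Int × Int) := sortS c.items with hsdef
  have hs_perm : s.Perm c.items := sortS_perm c.items
  have hs_pw : s.Pairwise Plt := sortS_pairwise c.items hkok
  have hsK : s.Pairwise (fun a b => a.1 ≠ b.1) :=
    (List.Perm.pairwise_iff (by intro a b h; exact Ne.symm h) hs_perm).mpr hkok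
  have hsplit : res ++ s.drop m = s := by rw [hres]; exact List.take_append_drop m s
  set rest : List (Int × Int) := s.drop m with hrest
  have hlen_res : res.length ≤ m := by rw [hres]; simpa using List.length_take_le m s
  have hrest_nil : res.length < m → rest = [] := by
    intro hlt
    have : s.length < m := by
      rw [hres, List.length_take] at hlt; omega
    exact List.drop_eq_nil_of_le (le_of_lt this)
  -- the updated dict
  set c' : PySem.Dict Int Int := c.insert x cnt with hc'
  have hkok' : KOK c' := KOK_insert c x cnt hkok
  set F : List (Int × Int) := s.filter (fun p => p.1 != x) with hF
  have hF_perm : F.Perm (c.items.filter (fun p => p.1 != x)) := hs_perm.filter _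
  have hitems' : c'.items.Perm (e :: F) :=
    (insert_items_perm c x cnt hkok).trans ((hF_perm.cons e).symm)
  have hF_pw : F.Pairwise Plt := hs_pw.filter _
  have hF_keys : ∀ p ∈ F, p.1 ≠ x := by
    intro p hp
    have := List.of_mem_filter hp
    simpa [bne_iff_ne] using this
  set s' : List (Int × Int) := PySem.List.insertBy aLt e F with hs'
  have hs'_perm : s'.Perm c'.items := (ins_perm e F).trans (hitems'.symm)
  have hs'_pw : s'.Pairwise Plt :=
    ins_pairwise e F hF_pw (fun y hy => Plt_total (fun hh => (hF_keys y hy) hh.symm))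
  have hsort' : sortS c'.items = s' :=
    sorted_unique ((sortS_perm c'.items).trans hs'_perm.symm) (sortS_pairwise c'.items hkok') hs'_pw
  rw [hsort']
  -- case on the scan
  cases hscan : aScan res x with
  | some pr =>
    obtain ⟨o, hres_eq, hpreK⟩ := aScan_eq_some hscan
    obtain ⟨pre, suf⟩ := pr
    simp only at hres_eq hpreK
    dsimp only
    rw [← he]
    -- the entry found in res is the dict's entry for x
    have hmem_s : (x, o) ∈ s := by
      have : (x, o) ∈ res := by rw [hres_eq]; simp
      rw [← hsplit]; exact List.mem_append_left _ this
    have ho : c.getD x 0 = o := getD_of_mem hkok (hs_perm.mem_iff.mp hmem_s)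
    -- s decomposed around (x, o)
    have hs_shape : s = pre ++ (x, o) :: (suf ++ rest) := by
      rw [← hsplit, hres_eq]; simp
    have hpw2 := hs_shape ▸ hs_pw
    have hK2 := hs_shape ▸ hsK
    rw [List.pairwise_append] at hpw2 hK2
    obtain ⟨hpw_pre, hpw_mid, hcross⟩ := hpw2
    obtain ⟨hK_pre, hK_mid, hKcross⟩ := hK2
    rcases List.pairwise_cons.mp hpw_mid with ⟨hxo_lt, -⟩
    rcases List.pairwise_cons.mp hK_mid with ⟨hxo_ne, -⟩
    -- e beats everything after the old entry
    have hbeats : ∀ z ∈ suf ++ rest, aLt e z = true := by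
      intro z hz
      refine (aLt_iff _ _).mpr (Or.inl ?_)
      have := hxo_lt z hz
      rcases this with h1 | ⟨h1, -⟩ <;> simp [he, hcnt, ho] <;> omega
    -- the filtered list drops exactly the old entry
    have hF_eq : F = pre ++ (suf ++ rest) := by
      rw [hF, hs_shape, List.filter_append, List.filter_cons]
      have h1 : pre.filter (fun p => p.1 != x) = pre :=
        List.filter_eq_self.mpr (fun p hp => by simpa [bne_iff_ne] using hpreK p hp)
      have h2 : (suf ++ rest).filter (fun p => p.1 != x) = suf ++ rest :=
        List.filter_eq_self.mpr (fun p hp => by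
          simpa [bne_iff_ne] using fun hh => (hxo_ne p hp) hh.symm)
      simp only [show ((x, o).1 != x) = false by simp, Bool.false_eq_true, if_false, h1, h2]
    have hs'_eq : s' = PySem.List.insertBy aLt e pre ++ (suf ++ rest) := by
      rw [hs', hF_eq, ins_append_all e pre (suf ++ rest) hbeats]
    -- the bubbled middle
    have hbub : aBubble pre e = PySem.List.insertBy aLt e pre :=
      bubble_eq_ins pre e hpw_pre
        (fun y hy => Plt_total (fun hh => (hpreK y hy) (Eq.symm (by simpa [he] using hh))))
    have hmid_len : (aBubble pre e ++ suf).length = res.length := by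
      rw [hbub, List.length_append, ins_length, hres_eq]; simp; omega
    have hres_ne : res ≠ [] := by rw [hres_eq]; simp
    have hm_pos : 0 < m := by
      by_contra hh
      have : m = 0 := by omega
      rw [hres, this] at hres_ne; simp at hres_ne
    have hk_pos : (m : Int) = k := by
      rcases le_or_gt k 0 with hk | hk
      · exfalso; have : m = 0 := by rw [hm]; omega
        omega
      · rw [hmInt]; omega
    have hnopop : ¬(((aBubble pre e ++ suf).length : Int) > k) := by
      rw [hmid_len, ← hk_pos]
      have := hlen_res; push_neg; exact_mod_cast this
    rw [if_neg hnopop, hs'_eq, ← hbub]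
    -- take m of s'
    rcases lt_or_eq_of_le hlen_res with hlt | heq
    · have hrnil : rest = [] := hrest_nil hlt
      rw [hrnil, List.append_nil]
      exact (List.take_of_length_le (by rw [hmid_len]; omega)).symm
    · have : (aBubble pre e ++ suf).length = m := by rw [hmid_len, heq]
      rw [← List.append_assoc]
      rw [List.take_append_of_le_length (by omega), List.take_of_length_le (by omega)]
  | none =>
    have hxres : ∀ p ∈ res, p.1 ≠ x := aScan_eq_none hscan
    dsimp only
    rw [← he]
    have hres_pw : res.Pairwise Plt := hres ▸ (List.Pairwise.sublist (List.take_sublist m s) hs_pw)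
    have hbub : aBubble res e = PySem.List.insertBy aLt e res :=
      bubble_eq_ins res e hres_pw
        (fun y hy => Plt_total (fun hh => (hxres y hy) (Eq.symm (by simpa [he] using hh))))
    have hF_eq : F = res ++ rest.filter (fun p => p.1 != x) := by
      rw [hF, ← hsplit, List.filter_append]
      congr 1
      exact List.filter_eq_self.mpr (fun p hp => by simpa [bne_iff_ne] using hxres p hp)
    have hmid_len : (aBubble res e).length = res.length + 1 := by rw [hbub, ins_length]
    rcases le_or_gt k 0 with hk | hk
    · -- m = 0, res = [], pop
      have hm0 : m = 0 := by rw [hm]; omega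
      have hres0 : res = [] := by rw [hres, hm0]; simp
      have hpop : ((aBubble res e).length : Int) > k := by
        rw [hmid_len, hres0]; simp; omega
      rw [if_pos hpop, hm0, hres0]
      simp [aBubble, aBubbleR]
    · have hk_pos : (m : Int) = k := by rw [hmInt]; omega
      rcases lt_or_eq_of_le hlen_res with hlt | heq
      · -- still room: no pop
        have hrnil : rest = [] := hrest_nil hlt
        have hnopop : ¬(((aBubble res e).length : Int) > k) := by
          rw [hmid_len, ← hk_pos]; push_neg; exact_mod_cast by omega
        rw [if_neg hnopop, hbub]
        rw [hF_eq, hrnil] at hs'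
        simp only [List.filter_nil, List.append_nil] at hs'
        rw [← hs']
        have : s'.length ≤ m := by
          rw [hs', ins_length]; omega
        exact (List.take_of_length_le this).symm
      · -- full: pop the last element
        have hpop : ((aBubble res e).length : Int) > k := by
          rw [hmid_len, ← hk_pos, heq]; exact_mod_cast by omega
        rw [if_pos hpop]
        by_cases hex : ∃ y ∈ res, aLt e y = true
        · have hs'_eq : s' = PySem.List.insertBy aLt e res ++ rest.filter (fun p => p.1 != x) := by
            rw [hs', hF_eq, ins_append_left e res _ hex]
          rw [hs'_eq, List.take_append_of_le_length (by rw [ins_length]; omega)]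
          rw [hbub, List.dropLast_eq_take, ins_length,
            show res.length + 1 - 1 = m by omega]
        · push_neg at hex
          have hall : ∀ y ∈ res, aLt e y = false := by
            intro y hy
            have := hex y hy
            exact Bool.not_eq_true _ ▸ (by simpa using this)
          have hs'_eq : s' = res ++ PySem.List.insertBy aLt e (rest.filter (fun p => p.1 != x)) := by
            rw [hs', hF_eq, ins_append_right e res _ hall]
          have hmid_eq : aBubble res e = res ++ [e] := by
            rw [hbub, PySem.List.insertBy_of_forall_not_before aLt e res hall]
          rw [hs'_eq, List.take_append_of_le_length (by omega), List.take_of_length_le (by omega),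
            hmid_eq]
          simp

theorem fold_eq (k : Int) (nums : List Int) (c : PySem.Dict Int Int)
    (res : List (Int × Int)) (out : List Int) (hkok : KOK c)
    (hres : res = (sortS c.items).take (max k 0).toNat) :
    (nums.foldl (aStep k) (c, res, out)).2.2 = (nums.foldl (bStep k) (c, out)).2 := by
  induction nums generalizing c res out with
  | nil => rfl
  | cons x nums ih =>
    simp only [List.foldl_cons]
    have hstep := step_res k x c res hkok hres
    have haStep : aStep k (c, res, out) x =
        (c.insert x (c.getD x 0 + 1),
         (sortS (c.insert x (c.getD x 0 + 1)).items).take (max k 0).toNat,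
         out ++ ((sortS (c.insert x (c.getD x 0 + 1)).items).take (max k 0).toNat).map (·.1)) := by
      simp only [aStep]
      rw [hstep]
    have hbStep : bStep k (c, out) x =
        (c.insert x (c.getD x 0 + 1),
         out ++ ((sortS (c.insert x (c.getD x 0 + 1)).items).take (max k 0).toNat).map (·.1)) := by
      simp only [bStep, PySem.Dict.modify]
      rw [sorted2_eq_sortS, PySem.List.slice_to _ (le_max_right k 0)]
    rw [haStep, hbStep]
    exact ih _ _ _ (KOK_insert c x _ hkok) rfl

-- ===== VERDICT (by name: the statement is the Claim_ definition above) =====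
theorem solve_spec : Claim_equal_solve := by
  intro n k numbers _
  show solve n k numbers = solve_alt n k numbers
  show PySem.Str.join " " ((numbers.foldl (aStep k) (PySem.Dict.empty, [], [])).2.2.map PySem.Int.toStr) =
    PySem.Str.join " " ((numbers.foldl (bStep k) (PySem.Dict.empty, [])).2.map PySem.Int.toStr)
  rw [fold_eq k numbers PySem.Dict.empty [] [] KOK_empty (by simp [sortS, PySem.Dict.empty])]
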